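-- pv_equiv track=rewrite | github.com/ph4r05/rtt-processor | rtt_tools/dump_data.py | get_ex_byidx
-- ===== SOURCE A (Python) =====
-- def get_ex_byidx(bitmap, idx):  # new index -> old index
--     oidx = 0
--     cnt = 0
--     for i, x in enumerate(bitmap):
--         if x == 1:  # selected to new round
--             if cnt == idx:
--                 return oidx
--             cnt += 1
--         oidx += 1
--     raise ValueError('Not found')
-- ===== SOURCE B (Python) =====
-- def get_ex_byidx(bitmap, idx):  # new index -> old index
--     selected = [i for i, x in enumerate(bitmap) if x == 1]
--     if not (0 <= idx < len(selected)):
--         raise ValueError('Not found')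
--     return selected[idx]
-- ===== Notes on version B (the rewrite author's own statement) =====
-- stated objective: simpler
-- what changed: Replaces the counting scan with early return by materializing the list of old indices of set bits once and doing a bounds-checked direct lookup.
import Mathlib
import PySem

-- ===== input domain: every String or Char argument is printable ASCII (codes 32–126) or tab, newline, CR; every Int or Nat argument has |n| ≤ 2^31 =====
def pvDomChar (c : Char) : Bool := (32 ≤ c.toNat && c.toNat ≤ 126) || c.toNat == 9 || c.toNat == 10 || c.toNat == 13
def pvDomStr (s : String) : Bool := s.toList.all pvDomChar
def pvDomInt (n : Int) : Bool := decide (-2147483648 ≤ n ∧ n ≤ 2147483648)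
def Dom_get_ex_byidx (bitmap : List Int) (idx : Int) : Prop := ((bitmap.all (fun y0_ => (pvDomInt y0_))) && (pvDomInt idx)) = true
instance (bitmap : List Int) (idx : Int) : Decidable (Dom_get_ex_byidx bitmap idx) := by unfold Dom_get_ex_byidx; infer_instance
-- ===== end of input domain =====

-- B replaces A's counting scan with a materialize-then-lookup decomposition (same return values; both raise ValueError on the same inputs).


-- ===== PORT A =====
-- A's loop: scan with old-index and count accumulators, early return when cnt == idx; none = the final ValueError.
def getExAuxA : List Int → Int → Int → Int → Option Int
  | [], _, _, _ => none
  | x :: rest, idx, oidx, cnt =>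
    if x = 1 then
      if cnt = idx then some oidx
      else getExAuxA rest idx (oidx + 1) (cnt + 1)
    else getExAuxA rest idx (oidx + 1) cnt

def get_ex_byidx (bitmap : List Int) (idx : Int) : Int :=
  (getExAuxA bitmap idx 0 0).getD 0

-- ===== PORT B =====
def get_ex_byidx_alt (bitmap : List Int) (idx : Int) : Int :=
  let selected := (PySem.List.enumerate bitmap 0).filterMap
    (fun p => if p.2 = 1 then some p.1 else none)
  if 0 ≤ idx ∧ idx < (selected.length : Int) then (selected[idx.toNat]?).getD 0 else 0

-- ===== PRECONDITION & SPEC =====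
-- Pre_ excludes exactly the inputs on which A raises ValueError('Not found'): idx negative or ≥ number of 1-entries.
def Pre_get_ex_byidx (bitmap : List Int) (idx : Int) : Prop :=
  0 ≤ idx ∧ idx < (bitmap.countP (fun x => x = 1) : Int)
instance (bitmap : List Int) (idx : Int) : Decidable (Pre_get_ex_byidx bitmap idx) := by
  unfold Pre_get_ex_byidx; infer_instance

def pvWitness_get_ex_byidx : List Int × Int := ([0, 1, 0, 1], 1)

def Spec_get_ex_byidx (bitmap : List Int) (idx : Int) (out : Int) : Prop := out = get_ex_byidx_alt bitmap idx
instance (bitmap : List Int) (idx : Int) (out : Int) : Decidable (Spec_get_ex_byidx bitmap idx out) := by unfold Spec_get_ex_byidx; infer_instance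

-- ===== CLAIM (what is proved, stated in full; the proofs are below) =====
def Claim_equal_get_ex_byidx : Prop := ∀ (bitmap : List Int) (idx : Int), Dom_get_ex_byidx bitmap idx → Pre_get_ex_byidx bitmap idx → Spec_get_ex_byidx bitmap idx (get_ex_byidx bitmap idx)

-- ===== LEMMAS AND PROOFS =====
-- B's selected list, starting enumeration at oidx (proof-side abbreviation).
def selFrom (bm : List Int) (oidx : Int) : List Int :=
  (PySem.List.enumerate bm oidx).filterMap (fun p => if p.2 = 1 then some p.1 else none)

theorem selFrom_nil (o : Int) : selFrom [] o = [] := by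
  simp [selFrom, PySem.List.enumerate_nil]

theorem selFrom_cons (x : Int) (rest : List Int) (o : Int) :
    selFrom (x :: rest) o =
      (if x = 1 then [o] else []) ++ selFrom rest (o + 1) := by
  simp [selFrom, PySem.List.enumerate_cons, List.filterMap_cons]
  split_ifs <;> simp

theorem selFrom_length (bm : List Int) (o : Int) :
    (selFrom bm o).length = bm.countP (fun x => x = 1) := by
  induction bm generalizing o with
  | nil => simp [selFrom_nil]
  | cons x rest ih =>
    rw [selFrom_cons, List.countP_cons]
    by_cases h : x = 1 <;> simp [h, ih]

theorem getExAuxA_eq (bm : List Int) (idx oidx cnt : Int) (h : cnt ≤ idx) :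
    getExAuxA bm idx oidx cnt = (selFrom bm oidx)[(idx - cnt).toNat]? := by
  induction bm generalizing oidx cnt with
  | nil => simp [getExAuxA, selFrom_nil]
  | cons x rest ih =>
    rw [selFrom_cons]
    by_cases hx : x = 1
    · by_cases hc : cnt = idx
      · subst hc
        simp [getExAuxA, hx]
      · have h1 : cnt + 1 ≤ idx := by omega
        have : (idx - cnt).toNat = (idx - (cnt + 1)).toNat + 1 := by omega
        simp [getExAuxA, hx, hc, this, ih _ _ h1]
    · simp [getExAuxA, hx, ih _ _ h]

-- ===== VERDICT (by name: the statement is the Claim_ definition above) =====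
theorem get_ex_byidx_spec : Claim_equal_get_ex_byidx := by
  intro bitmap idx _ hpre
  obtain ⟨h0, hlt⟩ := hpre
  unfold Spec_get_ex_byidx get_ex_byidx get_ex_byidx_alt
  rw [getExAuxA_eq bitmap idx 0 0 h0]
  have hsel : ((PySem.List.enumerate bitmap 0).filterMap
      (fun p => if p.2 = 1 then some p.1 else none)) = selFrom bitmap 0 := rfl
  have hlen := selFrom_length bitmap 0
  simp only [hsel]
  rw [if_pos ⟨h0, by omega⟩]
  simp
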